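-- pv_equiv track=rewrite | github.com/Howard1999/CloudNativeCourse_TDD_KATA | price.py | move_5_to_3
-- ===== SOURCE A (Python) =====
-- def get_35_cnt(combination:list[list[int]]) -> int:
--     cnt_3, cnt_5 = 0, 0
--
--     for set in combination:
--         n_diff = sum(set)
--         if n_diff == 3:
--             cnt_3 += 1
--         if n_diff == 5:
--             cnt_5 += 1
--
--     return min(cnt_3, cnt_5)
--
-- def move_5_to_3(combination: list[list[int]]) -> list[list[int]]:
--     cnt_35 = get_35_cnt(combination)
--     cnt_3, cnt_5 = cnt_35, cnt_35
--
--     for set in combination: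
--         cnt = sum(set)
--         # because 3, 5 always can move to 4, 4
--         # and price_of_set() only care about sum
--         # so just move book:0
--         if cnt_3 > 0 and cnt == 3:
--             set[0] += 1
--             cnt_3 -= 1
--         if cnt_5 > 0 and cnt == 5:
--             set[0] -= 1
--             cnt_5 -= 1
--         if cnt_3 == 0 and cnt_5 == 0:
--             break
--
--     return combination
-- ===== SOURCE B (Python) =====
-- def move_5_to_3(combination: list[list[int]]) -> list[list[int]]:
--     threes = [s for s in combination if sum(s) == 3]
--     fives = [s for s in combination if sum(s) == 5]
--     k = min(len(threes), len(fives))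
--     for s in threes[:k]:
--         s[0] += 1
--     for s in fives[:k]:
--         s[0] -= 1
--     return combination
-- ===== Notes on version B (the rewrite author's own statement) =====
-- stated objective: simpler
-- what changed: Replaced the counter-driven single rescan with early break (and the get_35_cnt helper) by two comprehensions collecting the sum-3 and sum-5 sets, then bumping the first k = min(len(threes), len(fives)) of each via slices.
import Mathlib
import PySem

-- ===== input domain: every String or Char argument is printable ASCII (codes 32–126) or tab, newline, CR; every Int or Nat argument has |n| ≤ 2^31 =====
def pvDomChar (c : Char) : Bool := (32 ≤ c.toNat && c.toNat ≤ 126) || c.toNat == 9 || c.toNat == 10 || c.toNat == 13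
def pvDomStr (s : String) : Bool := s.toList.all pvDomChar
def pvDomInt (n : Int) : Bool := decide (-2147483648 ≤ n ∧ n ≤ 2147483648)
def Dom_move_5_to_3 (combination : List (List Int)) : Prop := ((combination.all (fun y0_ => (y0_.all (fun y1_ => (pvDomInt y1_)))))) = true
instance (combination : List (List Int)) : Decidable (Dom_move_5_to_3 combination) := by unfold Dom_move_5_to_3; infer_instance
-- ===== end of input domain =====

-- B replaces A's counter-driven rescan-with-break by two filter passes and two
-- "bump the first k matching sets" passes; same return value (simpler decomposition).
-- Both Pythons mutate the inner lists in place and return the same outer list object;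
-- the equivalence proved here is about the returned value.

-- ===== PORT A =====
-- set[0] += d on a set whose sum is 3 or 5 (hence nonempty); [] branch is unreachable there
def pvUpd0 (s : List Int) (d : Int) : List Int :=
  match s with
  | [] => []
  | x :: xs => (x + d) :: xs

def get_35_cnt (combination : List (List Int)) : Int :=
  let p := combination.foldl (fun (p : Int × Int) s =>
    let n_diff := s.sum
    let p := if n_diff = 3 then (p.1 + 1, p.2) else p
    if n_diff = 5 then (p.1, p.2 + 1) else p) (0, 0)
  min p.1 p.2

-- the for-loop of move_5_to_3, with the break rendered as returning the rest unchanged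
def pvLoopA (c3 c5 : Int) : List (List Int) → List (List Int)
  | [] => []
  | s :: rest =>
    let cnt := s.sum
    let q1 := if c3 > 0 ∧ cnt = 3 then (pvUpd0 s 1, c3 - 1) else (s, c3)
    let q2 := if c5 > 0 ∧ cnt = 5 then (pvUpd0 q1.1 (-1), c5 - 1) else (q1.1, c5)
    if q1.2 = 0 ∧ q2.2 = 0 then q2.1 :: rest
    else q2.1 :: pvLoopA q1.2 q2.2 rest

def move_5_to_3 (combination : List (List Int)) : List (List Int) :=
  let cnt_35 := get_35_cnt combination
  pvLoopA cnt_35 cnt_35 combination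

-- ===== PORT B =====
-- 'for s in threes[:k]: s[0] += d' mutates, by reference, exactly the first k
-- sets of the list whose sum is t; pure rendering: update the first k matches.
def pvApplyFirstK (t d : Int) : Nat → List (List Int) → List (List Int)
  | _, [] => []
  | 0, l => l
  | k + 1, s :: rest =>
    if s.sum = t then pvUpd0 s d :: pvApplyFirstK t d k rest
    else s :: pvApplyFirstK t d (k + 1) rest

def move_5_to_3_alt (combination : List (List Int)) : List (List Int) :=
  let threes := combination.filter (fun s => s.sum = 3)
  let fives := combination.filter (fun s => s.sum = 5)
  let k := min threes.length fives.length
  pvApplyFirstK 5 (-1) k (pvApplyFirstK 3 1 k combination)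

-- ===== PRECONDITION & SPEC =====
def Spec_move_5_to_3 (combination : List (List Int)) (out : List (List Int)) : Prop := out = move_5_to_3_alt combination
instance (combination : List (List Int)) (out : List (List Int)) : Decidable (Spec_move_5_to_3 combination out) := by unfold Spec_move_5_to_3; infer_instance

-- ===== CLAIM (what is proved, stated in full; the proofs are below) =====
def Claim_equal_move_5_to_3 : Prop := ∀ (combination : List (List Int)), Dom_move_5_to_3 combination → Spec_move_5_to_3 combination (move_5_to_3 combination)

-- ===== LEMMAS AND PROOFS =====

theorem sum_upd0 (s : List Int) (d : Int) (h : s ≠ []) : (pvUpd0 s d).sum = s.sum + d := by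
  cases s with
  | nil => exact absurd rfl h
  | cons x xs => simp [pvUpd0]; ring

theorem ne_nil_of_sum3 (s : List Int) (h : s.sum = 3) : s ≠ [] := by
  intro hs; subst hs; simp at h

theorem applyFirstK_zero (t d : Int) (l : List (List Int)) :
    pvApplyFirstK t d 0 l = l := by
  cases l <;> simp [pvApplyFirstK]

-- the key bridge: A's loop with nonnegative counters is the composition of B's two passes
theorem loop_eq : ∀ (l : List (List Int)) (c3 c5 : Nat),
    pvLoopA (c3 : Int) (c5 : Int) l =
      pvApplyFirstK 5 (-1) c5 (pvApplyFirstK 3 1 c3 l) := by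
  intro l
  induction l with
  | nil => intro c3 c5; cases c3 <;> cases c5 <;> simp [pvLoopA, pvApplyFirstK]
  | cons s rest ih =>
    intro c3 c5
    cases c3 with
    | zero =>
      cases c5 with
      | zero => simp [pvLoopA, applyFirstK_zero]
      | succ m5 =>
        rw [applyFirstK_zero]
        by_cases h5 : s.sum = 5
        · simp only [pvLoopA, Nat.cast_zero, Nat.cast_succ]
          rw [if_neg (by omega : ¬((0:Int) > 0 ∧ s.sum = 3)),
              if_pos (⟨by omega, h5⟩ : ((m5:Int)+1) > 0 ∧ s.sum = 5)]
          simp only [pvApplyFirstK, if_pos h5]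
          by_cases hm : m5 = 0
          · subst hm; simp [applyFirstK_zero]
          · rw [if_neg (by simp; omega)]
            obtain ⟨m5', rfl⟩ := Nat.exists_eq_succ_of_ne_zero hm
            have := ih 0 (m5'+1)
            rw [applyFirstK_zero] at this
            simpa [Nat.cast_succ, show ((m5':Int)+1+1-1) = (m5':Int)+1 from by ring] using this
        · simp only [pvLoopA, Nat.cast_zero, Nat.cast_succ]
          rw [if_neg (by omega : ¬((0:Int) > 0 ∧ s.sum = 3)),
              if_neg (by simp [h5] : ¬(((m5:Int)+1) > 0 ∧ s.sum = 5))]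
          rw [if_neg (by simp; omega : ¬((0:Int) = 0 ∧ ((m5:Int)+1) = 0))]
          simp only [pvApplyFirstK, if_neg h5]
          have := ih 0 (m5+1)
          rw [applyFirstK_zero] at this
          simpa [Nat.cast_succ] using this
    | succ m3 =>
      cases c5 with
      | zero =>
        rw [show ((0:Nat):Int) = 0 from rfl]
        by_cases h3 : s.sum = 3
        · simp only [pvLoopA, Nat.cast_succ]
          rw [if_pos (⟨by omega, h3⟩ : ((m3:Int)+1) > 0 ∧ s.sum = 3),
              if_neg (by omega : ¬((0:Int) > 0 ∧ s.sum = 5))]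
          rw [applyFirstK_zero]
          simp only [pvApplyFirstK, if_pos h3]
          by_cases hm : m3 = 0
          · subst hm; simp [applyFirstK_zero]
          · rw [if_neg (by simp; omega)]
            obtain ⟨m3', rfl⟩ := Nat.exists_eq_succ_of_ne_zero hm
            have := ih (m3'+1) 0
            rw [applyFirstK_zero] at this
            simpa [Nat.cast_succ, show ((m3':Int)+1+1-1) = (m3':Int)+1 from by ring] using this
        · simp only [pvLoopA, Nat.cast_succ]
          rw [if_neg (by simp [h3] : ¬(((m3:Int)+1) > 0 ∧ s.sum = 3)),
              if_neg (by omega : ¬((0:Int) > 0 ∧ s.sum = 5))]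
          rw [if_neg (by simp; omega : ¬(((m3:Int)+1) = 0 ∧ (0:Int) = 0))]
          rw [applyFirstK_zero]
          simp only [pvApplyFirstK, if_neg h3]
          have := ih (m3+1) 0
          rw [applyFirstK_zero] at this
          simpa [Nat.cast_succ] using this
      | succ m5 =>
        by_cases h3 : s.sum = 3
        · have hne := ne_nil_of_sum3 s h3
          have h5' : (pvUpd0 s 1).sum ≠ 5 := by rw [sum_upd0 s 1 hne, h3]; norm_num
          simp only [pvLoopA, Nat.cast_succ]
          rw [if_pos (⟨by omega, h3⟩ : ((m3:Int)+1) > 0 ∧ s.sum = 3),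
              if_neg (by simp [h3] : ¬(((m5:Int)+1) > 0 ∧ s.sum = 5))]
          rw [if_neg (by simp; omega : ¬(((m3:Int)+1-1) = 0 ∧ ((m5:Int)+1) = 0))]
          simp only [pvApplyFirstK, if_pos h3, if_neg h5']
          have := ih m3 (m5+1)
          simpa [Nat.cast_succ, show ((m3:Int)+1-1) = (m3:Int) from by ring] using this
        · by_cases h5 : s.sum = 5
          · simp only [pvLoopA, Nat.cast_succ]
            rw [if_neg (by simp [h3] : ¬(((m3:Int)+1) > 0 ∧ s.sum = 3)),
                if_pos (⟨by omega, h5⟩ : ((m5:Int)+1) > 0 ∧ s.sum = 5)]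
            rw [if_neg (by simp; omega : ¬(((m3:Int)+1) = 0 ∧ ((m5:Int)+1-1) = 0))]
            simp only [pvApplyFirstK, if_neg h3, if_pos h5]
            have := ih (m3+1) m5
            simpa [Nat.cast_succ, show ((m5:Int)+1-1) = (m5:Int) from by ring] using this
          · simp only [pvLoopA, Nat.cast_succ]
            rw [if_neg (by simp [h3] : ¬(((m3:Int)+1) > 0 ∧ s.sum = 3)),
                if_neg (by simp [h5] : ¬(((m5:Int)+1) > 0 ∧ s.sum = 5))]
            rw [if_neg (by simp; omega : ¬(((m3:Int)+1) = 0 ∧ ((m5:Int)+1) = 0))]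
            simp only [pvApplyFirstK, if_neg h3, if_neg h5]
            have := ih (m3+1) (m5+1)
            simpa [Nat.cast_succ] using this

-- A's counting fold computes the two filter-lengths
theorem fold_count (l : List (List Int)) : ∀ (a b : Int),
    l.foldl (fun (p : Int × Int) s =>
      let n_diff := s.sum
      let p := if n_diff = 3 then (p.1 + 1, p.2) else p
      if n_diff = 5 then (p.1, p.2 + 1) else p) (a, b) =
    (a + ((l.filter (fun s => s.sum = 3)).length : Int),
     b + ((l.filter (fun s => s.sum = 5)).length : Int)) := by
  induction l with
  | nil => intro a b; simp
  | cons s rest ih =>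
    intro a b
    by_cases h3 : s.sum = 3
    · have h5 : s.sum ≠ 5 := by rw [h3]; norm_num
      simp [List.foldl_cons, h3, ih]; ring
    · by_cases h5 : s.sum = 5
      · simp [List.foldl_cons, h5, ih]; ring
      · simp [List.foldl_cons, h3, h5, ih]

theorem get_35_cnt_eq (l : List (List Int)) :
    get_35_cnt l = ((min (l.filter (fun s => s.sum = 3)).length
                         (l.filter (fun s => s.sum = 5)).length : Nat) : Int) := by
  unfold get_35_cnt
  rw [fold_count l 0 0]
  push_cast
  omega

-- ===== VERDICT (by name: the statement is the Claim_ definition above) =====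
theorem move_5_to_3_spec : Claim_equal_move_5_to_3 := by
  intro combination _
  unfold Spec_move_5_to_3 move_5_to_3 move_5_to_3_alt
  rw [get_35_cnt_eq]
  exact loop_eq combination _ _
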